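-- pv_equiv track=rewrite | github.com/ArnaudArnO/Musiquetranspose | main.py | convertir_accords_en_gamme_minreur__setieme
-- ===== SOURCE A (Python) =====
-- def convertir_accords_en_gamme_minreur__setieme(accords):
--     correspondances = {
--         'C': ['C', 'Eb', 'F', 'F#', 'G', 'Bb', 'C'],
--         'C#': ['C#', 'E', 'F#', 'G', 'G#', 'B', 'C#'],
--         'Db': ['Db', 'E', 'F#', 'G', 'Ab', 'B', 'Db'],
--         'D': ['D', 'F', 'G', 'G#', 'A', 'C', 'D'],
--         'D#': ['D#', 'F#', 'G#', 'A', 'A#', 'C#', 'D#'],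
--         'Eb': ['Eb', 'Gb', 'Ab', 'A', 'Bb', 'Db', 'Eb'],
--         'E': ['E', 'G', 'A', 'A#', 'B', 'D', 'E'],
--         'F': ['F', 'Ab', 'Bb', 'B', 'C', 'Eb', 'F'],
--         'F#': ['F#', 'A', 'B', 'C', 'C#', 'E', 'F#'],
--         'Gb': ['Gb', 'A', 'B', 'C', 'Db', 'E', 'Gb'],
--         'G': ['G', 'Bb', 'C', 'C#', 'D', 'F', 'G'],
--         'G#': ['G#', 'B', 'C#', 'D', 'D#', 'F#', 'G#'],
--         'Ab': ['Ab', 'B', 'C#', 'D', 'Eb', 'F#', 'Ab'],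
--         'A': ['A', 'C', 'D', 'D#', 'E', 'G', 'A'],
--         'A#': ['A#', 'C#', 'D#', 'E', 'F', 'G#', 'A#'],
--         'Bb': ['Bb', 'Db', 'Eb', 'E', 'F', 'Ab', 'Bb'],
--         'B': ['B', 'D', 'E', 'F', 'F#', 'A', 'B']
--     }
--
--     gamme = []
--
--     for accord in accords:
--         if accord.endswith('m'):
--             accord_base = accord[:-1]
--             notes_accord = correspondances.get(accord_base)
--             if notes_accord:
--                 gamme.extend([notes_accord[0], notes_accord[2], notes_accord[3], notes_accord[4], notes_accord[6]])
--         elif accord.endswith('7'):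
--             accord_base = accord[:-1]
--             notes_accord = correspondances.get(accord_base)
--             if notes_accord:
--                 gamme.extend([notes_accord[0], notes_accord[2], notes_accord[3], notes_accord[4], notes_accord[6]])
--                 gamme.append(notes_accord[1])
--         else:
--             notes_accord = correspondances.get(accord)
--             if notes_accord:
--                 gamme.extend(notes_accord)
--
--     return gamme
-- ===== SOURCE B (Python) =====
-- # One fully precomputed flat lookup table: every acceptable chord token (base,
-- # base+'m', base+'7') maps directly to its final note sequence; the function
-- # body is then a single flatten comprehension with no branching or slicing.
-- _EXPANDED = {
--     'C': ['C', 'Eb', 'F', 'F#', 'G', 'Bb', 'C'],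
--     'Cm': ['C', 'F', 'F#', 'G', 'C'],
--     'C7': ['C', 'F', 'F#', 'G', 'C', 'Eb'],
--     'C#': ['C#', 'E', 'F#', 'G', 'G#', 'B', 'C#'],
--     'C#m': ['C#', 'F#', 'G', 'G#', 'C#'],
--     'C#7': ['C#', 'F#', 'G', 'G#', 'C#', 'E'],
--     'Db': ['Db', 'E', 'F#', 'G', 'Ab', 'B', 'Db'],
--     'Dbm': ['Db', 'F#', 'G', 'Ab', 'Db'],
--     'Db7': ['Db', 'F#', 'G', 'Ab', 'Db', 'E'],
--     'D': ['D', 'F', 'G', 'G#', 'A', 'C', 'D'],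
--     'Dm': ['D', 'G', 'G#', 'A', 'D'],
--     'D7': ['D', 'G', 'G#', 'A', 'D', 'F'],
--     'D#': ['D#', 'F#', 'G#', 'A', 'A#', 'C#', 'D#'],
--     'D#m': ['D#', 'G#', 'A', 'A#', 'D#'],
--     'D#7': ['D#', 'G#', 'A', 'A#', 'D#', 'F#'],
--     'Eb': ['Eb', 'Gb', 'Ab', 'A', 'Bb', 'Db', 'Eb'],
--     'Ebm': ['Eb', 'Ab', 'A', 'Bb', 'Eb'],
--     'Eb7': ['Eb', 'Ab', 'A', 'Bb', 'Eb', 'Gb'],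
--     'E': ['E', 'G', 'A', 'A#', 'B', 'D', 'E'],
--     'Em': ['E', 'A', 'A#', 'B', 'E'],
--     'E7': ['E', 'A', 'A#', 'B', 'E', 'G'],
--     'F': ['F', 'Ab', 'Bb', 'B', 'C', 'Eb', 'F'],
--     'Fm': ['F', 'Bb', 'B', 'C', 'F'],
--     'F7': ['F', 'Bb', 'B', 'C', 'F', 'Ab'],
--     'F#': ['F#', 'A', 'B', 'C', 'C#', 'E', 'F#'],
--     'F#m': ['F#', 'B', 'C', 'C#', 'F#'],
--     'F#7': ['F#', 'B', 'C', 'C#', 'F#', 'A'],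
--     'Gb': ['Gb', 'A', 'B', 'C', 'Db', 'E', 'Gb'],
--     'Gbm': ['Gb', 'B', 'C', 'Db', 'Gb'],
--     'Gb7': ['Gb', 'B', 'C', 'Db', 'Gb', 'A'],
--     'G': ['G', 'Bb', 'C', 'C#', 'D', 'F', 'G'],
--     'Gm': ['G', 'C', 'C#', 'D', 'G'],
--     'G7': ['G', 'C', 'C#', 'D', 'G', 'Bb'],
--     'G#': ['G#', 'B', 'C#', 'D', 'D#', 'F#', 'G#'],
--     'G#m': ['G#', 'C#', 'D', 'D#', 'G#'],
--     'G#7': ['G#', 'C#', 'D', 'D#', 'G#', 'B'],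
--     'Ab': ['Ab', 'B', 'C#', 'D', 'Eb', 'F#', 'Ab'],
--     'Abm': ['Ab', 'C#', 'D', 'Eb', 'Ab'],
--     'Ab7': ['Ab', 'C#', 'D', 'Eb', 'Ab', 'B'],
--     'A': ['A', 'C', 'D', 'D#', 'E', 'G', 'A'],
--     'Am': ['A', 'D', 'D#', 'E', 'A'],
--     'A7': ['A', 'D', 'D#', 'E', 'A', 'C'],
--     'A#': ['A#', 'C#', 'D#', 'E', 'F', 'G#', 'A#'],
--     'A#m': ['A#', 'D#', 'E', 'F', 'A#'],
--     'A#7': ['A#', 'D#', 'E', 'F', 'A#', 'C#'],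
--     'Bb': ['Bb', 'Db', 'Eb', 'E', 'F', 'Ab', 'Bb'],
--     'Bbm': ['Bb', 'Eb', 'E', 'F', 'Bb'],
--     'Bb7': ['Bb', 'Eb', 'E', 'F', 'Bb', 'Db'],
--     'B': ['B', 'D', 'E', 'F', 'F#', 'A', 'B'],
--     'Bm': ['B', 'E', 'F', 'F#', 'B'],
--     'B7': ['B', 'E', 'F', 'F#', 'B', 'D'],
-- }
--
--
-- def convertir_accords_en_gamme_minreur__setieme(accords):
--     return [note for accord in accords for note in _EXPANDED.get(accord, [])]
-- ===== Notes on version B (the rewrite author's own statement) =====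
-- stated objective: faster
-- what changed: Replaces the per-element endswith branching, suffix slicing and index re-selection by one fully precomputed flat table mapping every chord token (base, base+'m', base+'7') directly to its final note list, so the function body is a single branch-free flatten comprehension.
import Mathlib
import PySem

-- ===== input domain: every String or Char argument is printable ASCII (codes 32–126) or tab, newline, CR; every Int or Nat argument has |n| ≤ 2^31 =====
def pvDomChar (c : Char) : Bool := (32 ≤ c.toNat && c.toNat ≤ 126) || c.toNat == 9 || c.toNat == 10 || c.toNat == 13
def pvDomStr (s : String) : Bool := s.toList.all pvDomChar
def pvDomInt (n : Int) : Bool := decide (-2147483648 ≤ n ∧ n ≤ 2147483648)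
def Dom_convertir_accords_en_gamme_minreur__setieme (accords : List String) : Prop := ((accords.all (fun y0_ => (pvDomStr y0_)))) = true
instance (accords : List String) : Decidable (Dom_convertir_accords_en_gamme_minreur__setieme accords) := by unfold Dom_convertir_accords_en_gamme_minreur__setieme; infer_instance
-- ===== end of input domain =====

-- ===== PORT A =====
-- B precomputes one flat 51-entry literal table (base, base+'m', base+'7' each mapped
-- to the final note list) and replaces A's branching loop by a single flatten pass.
-- note-list indices are always in range (every entry has 7 notes), so the total
-- pyGetD with default "" is exact for Python's notes_accord[i] here
def convertir_accords_en_gamme_minreur__setieme (accords : List String) : List String :=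
  let correspondances : PySem.Dict String (List String) := PySem.Dict.ofList [
    ("C", ["C", "Eb", "F", "F#", "G", "Bb", "C"]),
    ("C#", ["C#", "E", "F#", "G", "G#", "B", "C#"]),
    ("Db", ["Db", "E", "F#", "G", "Ab", "B", "Db"]),
    ("D", ["D", "F", "G", "G#", "A", "C", "D"]),
    ("D#", ["D#", "F#", "G#", "A", "A#", "C#", "D#"]),
    ("Eb", ["Eb", "Gb", "Ab", "A", "Bb", "Db", "Eb"]),
    ("E", ["E", "G", "A", "A#", "B", "D", "E"]),
    ("F", ["F", "Ab", "Bb", "B", "C", "Eb", "F"]),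
    ("F#", ["F#", "A", "B", "C", "C#", "E", "F#"]),
    ("Gb", ["Gb", "A", "B", "C", "Db", "E", "Gb"]),
    ("G", ["G", "Bb", "C", "C#", "D", "F", "G"]),
    ("G#", ["G#", "B", "C#", "D", "D#", "F#", "G#"]),
    ("Ab", ["Ab", "B", "C#", "D", "Eb", "F#", "Ab"]),
    ("A", ["A", "C", "D", "D#", "E", "G", "A"]),
    ("A#", ["A#", "C#", "D#", "E", "F", "G#", "A#"]),
    ("Bb", ["Bb", "Db", "Eb", "E", "F", "Ab", "Bb"]),
    ("B", ["B", "D", "E", "F", "F#", "A", "B"])]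
  accords.foldl (fun gamme accord =>
    if PySem.Str.endswith accord "m" then
      match correspondances.get? (PySem.Str.slice accord none (some (-1))) with
      | some notes_accord =>
        if notes_accord.isEmpty then gamme
        else gamme ++ [PySem.List.pyGetD notes_accord 0 "", PySem.List.pyGetD notes_accord 2 "",
                       PySem.List.pyGetD notes_accord 3 "", PySem.List.pyGetD notes_accord 4 "",
                       PySem.List.pyGetD notes_accord 6 ""]
      | none => gamme
    else if PySem.Str.endswith accord "7" then
      match correspondances.get? (PySem.Str.slice accord none (some (-1))) with
      | some notes_accord =>
        if notes_accord.isEmpty then gamme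
        else (gamme ++ [PySem.List.pyGetD notes_accord 0 "", PySem.List.pyGetD notes_accord 2 "",
                        PySem.List.pyGetD notes_accord 3 "", PySem.List.pyGetD notes_accord 4 "",
                        PySem.List.pyGetD notes_accord 6 ""]) ++ [PySem.List.pyGetD notes_accord 1 ""]
      | none => gamme
    else
      match correspondances.get? accord with
      | some notes_accord =>
        if notes_accord.isEmpty then gamme else gamme ++ notes_accord
      | none => gamme) []

-- ===== PORT B =====
def convertir_accords_en_gamme_minreur__setieme_alt (accords : List String) : List String :=
  let expanded : PySem.Dict String (List String) := PySem.Dict.ofList [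
    ("C", ["C", "Eb", "F", "F#", "G", "Bb", "C"]),
    ("Cm", ["C", "F", "F#", "G", "C"]),
    ("C7", ["C", "F", "F#", "G", "C", "Eb"]),
    ("C#", ["C#", "E", "F#", "G", "G#", "B", "C#"]),
    ("C#m", ["C#", "F#", "G", "G#", "C#"]),
    ("C#7", ["C#", "F#", "G", "G#", "C#", "E"]),
    ("Db", ["Db", "E", "F#", "G", "Ab", "B", "Db"]),
    ("Dbm", ["Db", "F#", "G", "Ab", "Db"]),
    ("Db7", ["Db", "F#", "G", "Ab", "Db", "E"]),
    ("D", ["D", "F", "G", "G#", "A", "C", "D"]),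
    ("Dm", ["D", "G", "G#", "A", "D"]),
    ("D7", ["D", "G", "G#", "A", "D", "F"]),
    ("D#", ["D#", "F#", "G#", "A", "A#", "C#", "D#"]),
    ("D#m", ["D#", "G#", "A", "A#", "D#"]),
    ("D#7", ["D#", "G#", "A", "A#", "D#", "F#"]),
    ("Eb", ["Eb", "Gb", "Ab", "A", "Bb", "Db", "Eb"]),
    ("Ebm", ["Eb", "Ab", "A", "Bb", "Eb"]),
    ("Eb7", ["Eb", "Ab", "A", "Bb", "Eb", "Gb"]),
    ("E", ["E", "G", "A", "A#", "B", "D", "E"]),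
    ("Em", ["E", "A", "A#", "B", "E"]),
    ("E7", ["E", "A", "A#", "B", "E", "G"]),
    ("F", ["F", "Ab", "Bb", "B", "C", "Eb", "F"]),
    ("Fm", ["F", "Bb", "B", "C", "F"]),
    ("F7", ["F", "Bb", "B", "C", "F", "Ab"]),
    ("F#", ["F#", "A", "B", "C", "C#", "E", "F#"]),
    ("F#m", ["F#", "B", "C", "C#", "F#"]),
    ("F#7", ["F#", "B", "C", "C#", "F#", "A"]),
    ("Gb", ["Gb", "A", "B", "C", "Db", "E", "Gb"]),
    ("Gbm", ["Gb", "B", "C", "Db", "Gb"]),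
    ("Gb7", ["Gb", "B", "C", "Db", "Gb", "A"]),
    ("G", ["G", "Bb", "C", "C#", "D", "F", "G"]),
    ("Gm", ["G", "C", "C#", "D", "G"]),
    ("G7", ["G", "C", "C#", "D", "G", "Bb"]),
    ("G#", ["G#", "B", "C#", "D", "D#", "F#", "G#"]),
    ("G#m", ["G#", "C#", "D", "D#", "G#"]),
    ("G#7", ["G#", "C#", "D", "D#", "G#", "B"]),
    ("Ab", ["Ab", "B", "C#", "D", "Eb", "F#", "Ab"]),
    ("Abm", ["Ab", "C#", "D", "Eb", "Ab"]),
    ("Ab7", ["Ab", "C#", "D", "Eb", "Ab", "B"]),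
    ("A", ["A", "C", "D", "D#", "E", "G", "A"]),
    ("Am", ["A", "D", "D#", "E", "A"]),
    ("A7", ["A", "D", "D#", "E", "A", "C"]),
    ("A#", ["A#", "C#", "D#", "E", "F", "G#", "A#"]),
    ("A#m", ["A#", "D#", "E", "F", "A#"]),
    ("A#7", ["A#", "D#", "E", "F", "A#", "C#"]),
    ("Bb", ["Bb", "Db", "Eb", "E", "F", "Ab", "Bb"]),
    ("Bbm", ["Bb", "Eb", "E", "F", "Bb"]),
    ("Bb7", ["Bb", "Eb", "E", "F", "Bb", "Db"]),
    ("B", ["B", "D", "E", "F", "F#", "A", "B"]),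
    ("Bm", ["B", "E", "F", "F#", "B"]),
    ("B7", ["B", "E", "F", "F#", "B", "D"])]
  accords.flatMap (fun accord => expanded.getD accord [])

-- ===== PRECONDITION & SPEC =====
def Spec_convertir_accords_en_gamme_minreur__setieme (accords : List String) (out : List String) : Prop := out = convertir_accords_en_gamme_minreur__setieme_alt accords
instance (accords : List String) (out : List String) : Decidable (Spec_convertir_accords_en_gamme_minreur__setieme accords out) := by unfold Spec_convertir_accords_en_gamme_minreur__setieme; infer_instance

-- ===== CLAIM (what is proved, stated in full; the proofs are below) =====
def Claim_equal_convertir_accords_en_gamme_minreur__setieme : Prop := ∀ (accords : List String), Dom_convertir_accords_en_gamme_minreur__setieme accords → Spec_convertir_accords_en_gamme_minreur__setieme accords (convertir_accords_en_gamme_minreur__setieme accords)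

-- ===== LEMMAS AND PROOFS =====

-- the shared literal table, as an association list
def pvCorr : List (String × List String) := [
    ("C", ["C", "Eb", "F", "F#", "G", "Bb", "C"]),
    ("C#", ["C#", "E", "F#", "G", "G#", "B", "C#"]),
    ("Db", ["Db", "E", "F#", "G", "Ab", "B", "Db"]),
    ("D", ["D", "F", "G", "G#", "A", "C", "D"]),
    ("D#", ["D#", "F#", "G#", "A", "A#", "C#", "D#"]),
    ("Eb", ["Eb", "Gb", "Ab", "A", "Bb", "Db", "Eb"]),
    ("E", ["E", "G", "A", "A#", "B", "D", "E"]),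
    ("F", ["F", "Ab", "Bb", "B", "C", "Eb", "F"]),
    ("F#", ["F#", "A", "B", "C", "C#", "E", "F#"]),
    ("Gb", ["Gb", "A", "B", "C", "Db", "E", "Gb"]),
    ("G", ["G", "Bb", "C", "C#", "D", "F", "G"]),
    ("G#", ["G#", "B", "C#", "D", "D#", "F#", "G#"]),
    ("Ab", ["Ab", "B", "C#", "D", "Eb", "F#", "Ab"]),
    ("A", ["A", "C", "D", "D#", "E", "G", "A"]),
    ("A#", ["A#", "C#", "D#", "E", "F", "G#", "A#"]),
    ("Bb", ["Bb", "Db", "Eb", "E", "F", "Ab", "Bb"]),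
    ("B", ["B", "D", "E", "F", "F#", "A", "B"])]

def pvMin (ns : List String) : List String :=
  [PySem.List.pyGetD ns 0 "", PySem.List.pyGetD ns 2 "", PySem.List.pyGetD ns 3 "",
   PySem.List.pyGetD ns 4 "", PySem.List.pyGetD ns 6 ""]

def pvSev (ns : List String) : List String :=
  [PySem.List.pyGetD ns 0 "", PySem.List.pyGetD ns 2 "", PySem.List.pyGetD ns 3 "",
   PySem.List.pyGetD ns 4 "", PySem.List.pyGetD ns 6 "", PySem.List.pyGetD ns 1 ""]

def pvExpand (corr : List (String × List String)) : List (String × List String) :=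
  corr.flatMap (fun p => [(p.1, p.2), (p.1 ++ "m", pvMin p.2), (p.1 ++ "7", pvSev p.2)])

-- A's per-chord contribution, over an arbitrary table
def pvStepA (corr : List (String × List String)) (s : String) : List String :=
  if PySem.Str.endswith s "m" then
    match (PySem.Dict.mk corr).get? (PySem.Str.slice s none (some (-1))) with
    | some notes => if notes.isEmpty then [] else pvMin notes
    | none => []
  else if PySem.Str.endswith s "7" then
    match (PySem.Dict.mk corr).get? (PySem.Str.slice s none (some (-1))) with
    | some notes => if notes.isEmpty then [] else pvSev notes
    | none => []
  else
    match (PySem.Dict.mk corr).get? s with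
    | some notes => if notes.isEmpty then [] else notes
    | none => []

def pvGood (corr : List (String × List String)) : Prop :=
  ∀ p ∈ corr, PySem.Str.endswith p.1 "m" = false ∧ PySem.Str.endswith p.1 "7" = false ∧ p.2 ≠ []

-- ----- string micro-lemmas -----

theorem pv_toList_concat (a : String) (c : Char) :
    (a ++ String.ofList [c]).toList = a.toList ++ [c] := by
  rw [String.toList_append, String.toList_ofList]

theorem pv_endswith_concat (a : String) (c : Char) :
    PySem.Str.endswith (a ++ String.ofList [c]) (String.ofList [c]) = true := by
  rw [PySem.Str.endswith_eq, String.toList_append, String.toList_ofList, PySem.Chars.endswith_iff]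
  exact List.suffix_append _ _

theorem pv_ne_concat (a : String) (c : Char) : a ≠ a ++ String.ofList [c] := by
  intro he
  have h2 := congrArg (fun t => t.toList.length) he
  simp [String.toList_append] at h2

theorem pv_concat_ne (a b : String) (c d : Char) (h : c ≠ d) :
    a ++ String.ofList [c] ≠ b ++ String.ofList [d] := by
  intro he
  have h2 := congrArg String.toList he
  rw [pv_toList_concat, pv_toList_concat] at h2
  have h3 := congrArg List.getLast? h2
  simp at h3
  exact h h3

theorem pv_endswith_split (s : String) (c : Char) (h : PySem.Str.endswith s (String.ofList [c]) = true) :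
    s = PySem.Str.slice s none (some (-1)) ++ String.ofList [c] := by
  rw [PySem.Str.endswith_eq, String.toList_ofList, PySem.Chars.endswith_iff] at h
  obtain ⟨t, ht⟩ := h
  apply String.toList_inj.mp
  rw [pv_toList_concat, PySem.Str.slice_to_neg_one, ← ht]
  simp

-- ----- the key pointwise equality -----

theorem pv_step_eq (corr : List (String × List String)) (h : pvGood corr) (s : String) :
    pvStepA corr s = (PySem.Dict.mk (pvExpand corr)).getD s [] := by
  induction corr with
  | nil =>
    simp only [pvStepA, pvExpand, List.flatMap_nil, PySem.Dict.getD_eq_get?_getD,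
      PySem.Dict.get?, List.find?_nil, Option.map_none, Option.getD_none]
    split <;> [skip; split] <;> rfl
  | cons p rest ih =>
    obtain ⟨k, ns⟩ := p
    obtain ⟨hkm, hk7, hne⟩ := h _ (List.mem_cons_self ..)
    dsimp only at hkm hk7 hne
    have hrest : pvGood rest := fun q hq => h q (List.mem_cons_of_mem _ hq)
    have hB0 := ih hrest
    have hmm : ("m" : String) = String.ofList ['m'] := rfl
    have h77 : ("7" : String) = String.ofList ['7'] := rfl
    have hexp : pvExpand ((k, ns) :: rest)
        = (k, ns) :: (k ++ "m", pvMin ns) :: (k ++ "7", pvSev ns) :: pvExpand rest := by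
      simp [pvExpand]
    rw [hexp]
    by_cases hm : PySem.Str.endswith s "m" = true
    · have hm' : PySem.Chars.endswith s.toList ['m'] = true := hm
      have hsplit := pv_endswith_split s 'm' (by rwa [hmm] at hm)
      by_cases hbk : PySem.Str.slice s none (some (-1)) = k
      · -- s = k ++ "m": the head's minor entry answers on both sides
        have hs : s = k ++ "m" := by rw [hmm, ← hbk]; exact hsplit
        have h1 : (k == s) = false := by
          simp only [beq_eq_false_iff_ne]; intro he
          exact pv_ne_concat k 'm' (by rw [← hmm]; exact he.trans hs)
        have h2 : (k ++ "m" == s) = true := by simp [hs]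
        have hA : pvStepA ((k, ns) :: rest) s = pvMin ns := by
          simp [pvStepA, hm', hbk, PySem.Dict.get?_mk_cons, hne]
        rw [hA, PySem.Dict.getD_eq_get?_getD, PySem.Dict.get?_mk_cons,
          PySem.Dict.get?_mk_cons, h1, h2]
        rfl
      · -- both lookups fall through to the rest of the table
        have h1 : (k == s) = false := by
          simp only [beq_eq_false_iff_ne]; intro he
          rw [← he] at hm
          exact Bool.false_ne_true (hkm.symm.trans hm)
        have h2 : (k ++ "m" == s) = false := by
          simp only [beq_eq_false_iff_ne]; intro he
          apply hbk
          have h4 : k ++ String.ofList ['m']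
              = PySem.Str.slice s none (some (-1)) ++ String.ofList ['m'] := by
            rw [← hmm, he]; exact hsplit
          have h5 := congrArg String.toList h4
          rw [pv_toList_concat, pv_toList_concat] at h5
          exact (String.toList_inj.mp (List.append_cancel_right h5)).symm
        have h3 : (k ++ "7" == s) = false := by
          simp only [beq_eq_false_iff_ne]; intro he
          exact pv_concat_ne k (PySem.Str.slice s none (some (-1))) '7' 'm' (by decide)
            (by rw [← h77]; exact he.trans hsplit)
        have hks : ¬(k = PySem.Str.slice s none (some (-1))) := fun he => hbk he.symm
        have hA : pvStepA ((k, ns) :: rest) s = pvStepA rest s := by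
          simp [pvStepA, hm', PySem.Dict.get?_mk_cons, hks]
        rw [hA, hB0]
        have hp1 : ¬(k = s) := by simpa using h1
        have hp2 : ¬(k ++ "m" = s) := by simpa using h2
        have hp3 : ¬(k ++ "7" = s) := by simpa using h3
        simp [PySem.Dict.getD_eq_get?_getD, PySem.Dict.get?_mk_cons, hp1, hp2, hp3]
    · have hm' : PySem.Chars.endswith s.toList ['m'] = false := by simpa using hm
      by_cases h7 : PySem.Str.endswith s "7" = true
      · have h7' : PySem.Chars.endswith s.toList ['7'] = true := h7
        have hsplit := pv_endswith_split s '7' (by rwa [h77] at h7)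
        by_cases hbk : PySem.Str.slice s none (some (-1)) = k
        · have hs : s = k ++ "7" := by rw [h77, ← hbk]; exact hsplit
          have h1 : (k == s) = false := by
            simp only [beq_eq_false_iff_ne]; intro he
            exact pv_ne_concat k '7' (by rw [← h77]; exact he.trans hs)
          have h2 : (k ++ "m" == s) = false := by
            simp only [beq_eq_false_iff_ne]; intro he
            exact pv_concat_ne k (PySem.Str.slice s none (some (-1))) 'm' '7' (by decide)
              (by rw [← hmm]; exact he.trans hsplit)
          have h3 : (k ++ "7" == s) = true := by simp [hs]
          have hA : pvStepA ((k, ns) :: rest) s = pvSev ns := by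
            simp [pvStepA, hm', h7', hbk, PySem.Dict.get?_mk_cons, hne]
          rw [hA, PySem.Dict.getD_eq_get?_getD, PySem.Dict.get?_mk_cons,
            PySem.Dict.get?_mk_cons, PySem.Dict.get?_mk_cons, h1, h2, h3]
          rfl
        · have h1 : (k == s) = false := by
            simp only [beq_eq_false_iff_ne]; intro he
            rw [← he] at h7
            exact Bool.false_ne_true (hk7.symm.trans h7)
          have h2 : (k ++ "m" == s) = false := by
            simp only [beq_eq_false_iff_ne]; intro he
            exact pv_concat_ne k (PySem.Str.slice s none (some (-1))) 'm' '7' (by decide)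
              (by rw [← hmm]; exact he.trans hsplit)
          have h3 : (k ++ "7" == s) = false := by
            simp only [beq_eq_false_iff_ne]; intro he
            apply hbk
            have h4 : k ++ String.ofList ['7']
                = PySem.Str.slice s none (some (-1)) ++ String.ofList ['7'] := by
              rw [← h77, he]; exact hsplit
            have h5 := congrArg String.toList h4
            rw [pv_toList_concat, pv_toList_concat] at h5
            exact (String.toList_inj.mp (List.append_cancel_right h5)).symm
          have hks : ¬(k = PySem.Str.slice s none (some (-1))) := fun he => hbk he.symm
          have hA : pvStepA ((k, ns) :: rest) s = pvStepA rest s := by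
            simp [pvStepA, hm', h7', PySem.Dict.get?_mk_cons, hks]
          rw [hA, hB0]
          have hp1 : ¬(k = s) := by simpa using h1
          have hp2 : ¬(k ++ "m" = s) := by simpa using h2
          have hp3 : ¬(k ++ "7" = s) := by simpa using h3
          simp [PySem.Dict.getD_eq_get?_getD, PySem.Dict.get?_mk_cons, hp1, hp2, hp3]
      · -- a plain chord: direct lookup on both sides
        have h7' : PySem.Chars.endswith s.toList ['7'] = false := by simpa using h7
        by_cases hsk : s = k
        · have h1 : (k == s) = true := by simp [hsk]
          have hA : pvStepA ((k, ns) :: rest) s = ns := by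
            subst hsk
            simp [pvStepA, hm', h7', PySem.Dict.get?_mk_cons, hne]
          rw [hA, PySem.Dict.getD_eq_get?_getD, PySem.Dict.get?_mk_cons, h1]
          rfl
        · have h1 : (k == s) = false := by
            simp only [beq_eq_false_iff_ne]; intro he; exact hsk he.symm
          have h2 : (k ++ "m" == s) = false := by
            simp only [beq_eq_false_iff_ne]; intro he
            rw [← he, hmm] at hm
            exact hm (pv_endswith_concat k 'm')
          have h3 : (k ++ "7" == s) = false := by
            simp only [beq_eq_false_iff_ne]; intro he
            rw [← he, h77] at h7
            exact h7 (pv_endswith_concat k '7')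
          have hks : ¬(k = s) := fun he => hsk he.symm
          have hA : pvStepA ((k, ns) :: rest) s = pvStepA rest s := by
            simp [pvStepA, hm', h7', PySem.Dict.get?_mk_cons, hks]
          rw [hA, hB0]
          have hp1 : ¬(k = s) := by simpa using h1
          have hp2 : ¬(k ++ "m" = s) := by simpa using h2
          have hp3 : ¬(k ++ "7" = s) := by simpa using h3
          simp [PySem.Dict.getD_eq_get?_getD, PySem.Dict.get?_mk_cons, hp1, hp2, hp3]

theorem pv_good_corr : pvGood pvCorr := by
  intro p hp
  fin_cases hp <;> exact ⟨by decide, by decide, by decide⟩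

-- the two programs as flatMaps
theorem pv_A_eq (accords : List String) :
    convertir_accords_en_gamme_minreur__setieme accords = accords.flatMap (pvStepA pvCorr) := by
  unfold convertir_accords_en_gamme_minreur__setieme
  have hd : PySem.Dict.ofList [
    (("C" : String), ["C", "Eb", "F", "F#", "G", "Bb", "C"]),
    ("C#", ["C#", "E", "F#", "G", "G#", "B", "C#"]),
    ("Db", ["Db", "E", "F#", "G", "Ab", "B", "Db"]),
    ("D", ["D", "F", "G", "G#", "A", "C", "D"]),
    ("D#", ["D#", "F#", "G#", "A", "A#", "C#", "D#"]),
    ("Eb", ["Eb", "Gb", "Ab", "A", "Bb", "Db", "Eb"]),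
    ("E", ["E", "G", "A", "A#", "B", "D", "E"]),
    ("F", ["F", "Ab", "Bb", "B", "C", "Eb", "F"]),
    ("F#", ["F#", "A", "B", "C", "C#", "E", "F#"]),
    ("Gb", ["Gb", "A", "B", "C", "Db", "E", "Gb"]),
    ("G", ["G", "Bb", "C", "C#", "D", "F", "G"]),
    ("G#", ["G#", "B", "C#", "D", "D#", "F#", "G#"]),
    ("Ab", ["Ab", "B", "C#", "D", "Eb", "F#", "Ab"]),
    ("A", ["A", "C", "D", "D#", "E", "G", "A"]),
    ("A#", ["A#", "C#", "D#", "E", "F", "G#", "A#"]),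
    ("Bb", ["Bb", "Db", "Eb", "E", "F", "Ab", "Bb"]),
    ("B", ["B", "D", "E", "F", "F#", "A", "B"])] = PySem.Dict.mk pvCorr := by decide
  dsimp only
  rw [hd]
  have hfun : ∀ (g : List String) (s : String),
      (if PySem.Str.endswith s "m" then
        match (PySem.Dict.mk pvCorr).get? (PySem.Str.slice s none (some (-1))) with
        | some notes_accord =>
          if notes_accord.isEmpty then g
          else g ++ [PySem.List.pyGetD notes_accord 0 "", PySem.List.pyGetD notes_accord 2 "",
                     PySem.List.pyGetD notes_accord 3 "", PySem.List.pyGetD notes_accord 4 "",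
                     PySem.List.pyGetD notes_accord 6 ""]
        | none => g
      else if PySem.Str.endswith s "7" then
        match (PySem.Dict.mk pvCorr).get? (PySem.Str.slice s none (some (-1))) with
        | some notes_accord =>
          if notes_accord.isEmpty then g
          else (g ++ [PySem.List.pyGetD notes_accord 0 "", PySem.List.pyGetD notes_accord 2 "",
                      PySem.List.pyGetD notes_accord 3 "", PySem.List.pyGetD notes_accord 4 "",
                      PySem.List.pyGetD notes_accord 6 ""]) ++ [PySem.List.pyGetD notes_accord 1 ""]
        | none => g
      else
        match (PySem.Dict.mk pvCorr).get? s with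
        | some notes_accord =>
          if notes_accord.isEmpty then g else g ++ notes_accord
        | none => g) = g ++ pvStepA pvCorr s := by
    intro g s
    simp only [pvStepA, pvMin, pvSev]
    split
    · split <;> (try split) <;> simp
    · split
      · split <;> (try split) <;> simp
      · split <;> (try split) <;> simp
  calc accords.foldl _ [] = accords.foldl (fun g s => g ++ pvStepA pvCorr s) [] := by
        apply PySem.List.foldl_congr_mem
        intro g x _
        exact hfun g x
    _ = accords.flatMap (pvStepA pvCorr) := by
        rw [PySem.List.foldl_append_eq_flatMap]; simp

set_option maxRecDepth 8192 in
theorem pv_B_eq (accords : List String) :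
    convertir_accords_en_gamme_minreur__setieme_alt accords
      = accords.flatMap (fun s => (PySem.Dict.mk (pvExpand pvCorr)).getD s []) := by
  unfold convertir_accords_en_gamme_minreur__setieme_alt
  have hd : PySem.Dict.ofList [
    (("C" : String), ["C", "Eb", "F", "F#", "G", "Bb", "C"]),
    ("Cm", ["C", "F", "F#", "G", "C"]),
    ("C7", ["C", "F", "F#", "G", "C", "Eb"]),
    ("C#", ["C#", "E", "F#", "G", "G#", "B", "C#"]),
    ("C#m", ["C#", "F#", "G", "G#", "C#"]),
    ("C#7", ["C#", "F#", "G", "G#", "C#", "E"]),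
    ("Db", ["Db", "E", "F#", "G", "Ab", "B", "Db"]),
    ("Dbm", ["Db", "F#", "G", "Ab", "Db"]),
    ("Db7", ["Db", "F#", "G", "Ab", "Db", "E"]),
    ("D", ["D", "F", "G", "G#", "A", "C", "D"]),
    ("Dm", ["D", "G", "G#", "A", "D"]),
    ("D7", ["D", "G", "G#", "A", "D", "F"]),
    ("D#", ["D#", "F#", "G#", "A", "A#", "C#", "D#"]),
    ("D#m", ["D#", "G#", "A", "A#", "D#"]),
    ("D#7", ["D#", "G#", "A", "A#", "D#", "F#"]),
    ("Eb", ["Eb", "Gb", "Ab", "A", "Bb", "Db", "Eb"]),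
    ("Ebm", ["Eb", "Ab", "A", "Bb", "Eb"]),
    ("Eb7", ["Eb", "Ab", "A", "Bb", "Eb", "Gb"]),
    ("E", ["E", "G", "A", "A#", "B", "D", "E"]),
    ("Em", ["E", "A", "A#", "B", "E"]),
    ("E7", ["E", "A", "A#", "B", "E", "G"]),
    ("F", ["F", "Ab", "Bb", "B", "C", "Eb", "F"]),
    ("Fm", ["F", "Bb", "B", "C", "F"]),
    ("F7", ["F", "Bb", "B", "C", "F", "Ab"]),
    ("F#", ["F#", "A", "B", "C", "C#", "E", "F#"]),
    ("F#m", ["F#", "B", "C", "C#", "F#"]),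
    ("F#7", ["F#", "B", "C", "C#", "F#", "A"]),
    ("Gb", ["Gb", "A", "B", "C", "Db", "E", "Gb"]),
    ("Gbm", ["Gb", "B", "C", "Db", "Gb"]),
    ("Gb7", ["Gb", "B", "C", "Db", "Gb", "A"]),
    ("G", ["G", "Bb", "C", "C#", "D", "F", "G"]),
    ("Gm", ["G", "C", "C#", "D", "G"]),
    ("G7", ["G", "C", "C#", "D", "G", "Bb"]),
    ("G#", ["G#", "B", "C#", "D", "D#", "F#", "G#"]),
    ("G#m", ["G#", "C#", "D", "D#", "G#"]),
    ("G#7", ["G#", "C#", "D", "D#", "G#", "B"]),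
    ("Ab", ["Ab", "B", "C#", "D", "Eb", "F#", "Ab"]),
    ("Abm", ["Ab", "C#", "D", "Eb", "Ab"]),
    ("Ab7", ["Ab", "C#", "D", "Eb", "Ab", "B"]),
    ("A", ["A", "C", "D", "D#", "E", "G", "A"]),
    ("Am", ["A", "D", "D#", "E", "A"]),
    ("A7", ["A", "D", "D#", "E", "A", "C"]),
    ("A#", ["A#", "C#", "D#", "E", "F", "G#", "A#"]),
    ("A#m", ["A#", "D#", "E", "F", "A#"]),
    ("A#7", ["A#", "D#", "E", "F", "A#", "C#"]),
    ("Bb", ["Bb", "Db", "Eb", "E", "F", "Ab", "Bb"]),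
    ("Bbm", ["Bb", "Eb", "E", "F", "Bb"]),
    ("Bb7", ["Bb", "Eb", "E", "F", "Bb", "Db"]),
    ("B", ["B", "D", "E", "F", "F#", "A", "B"]),
    ("Bm", ["B", "E", "F", "F#", "B"]),
    ("B7", ["B", "E", "F", "F#", "B", "D"])] = PySem.Dict.mk (pvExpand pvCorr) := by decide
  dsimp only
  rw [hd]

-- ===== VERDICT (by name: the statement is the Claim_ definition above) =====
theorem convertir_accords_en_gamme_minreur__setieme_spec : Claim_equal_convertir_accords_en_gamme_minreur__setieme := by
  intro accords _
  unfold Spec_convertir_accords_en_gamme_minreur__setieme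
  rw [pv_A_eq, pv_B_eq]
  exact List.flatMap_congr (fun s _ => pv_step_eq pvCorr pv_good_corr s)
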